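-- pv_equiv track=rewrite | github.com/pypi-data/pypi-mirror-360 | packages/image-crawler-utils/image_crawler_utils-0.4.5-py3-none-any.whl/image_crawler_utils/keyword.py | min_len_keyword_group
-- ===== SOURCE A (Python) =====
-- from typing import Optional, Union
-- from collections.abc import Iterable
--
-- def min_len_keyword_group(
--     keyword_group_list: Iterable[Iterable],
--     below: Optional[int]=None,
-- ) -> list[list]:
--     """
--     For a list of keyword groups (i.e. lists of keywords), get a list of keyword group with the smallest length, or all keyword groups whose length are no larger than ``below``.
--
--     Args:
--         keyword_group_list (list[list[str]]): A list of keyword groups.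
--         below (int): If not None, try return all keyword group with length below "below" parameter. If such groups don't exist, return the one with the smallest length.
--
--     Returns:
--         A list of keyword groups (i.e. lists of keywords)
--     """
--     if(len(keyword_group_list) <= 0):
--         return []
--
--     min_group_list = [keyword_group_list[0]]
--     min_len = len(keyword_group_list[0])
--     below_group_list = []
--
--     for group in keyword_group_list:
--
--         if below is not None and len(group) <= below and group not in below_group_list:
--             below_group_list.append(group)
--
--         if len(group) < min_len:
--             min_len = len(group)
--             min_group_list = [group]
--         elif len(group) == min_len and group not in min_group_list:
--             min_group_list.append(group)
--
--     if below is not None and len(below_group_list) > 0: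
--         return below_group_list
--     else:
--         return min_group_list
-- ===== SOURCE B (Python) =====
-- def min_len_keyword_group(keyword_group_list, below=None):
--     groups = list(keyword_group_list)
--     if not groups:
--         return []
--
--     def dedup(xs):
--         out = []
--         for g in xs:
--             if g not in out:
--                 out.append(g)
--         return out
--
--     if below is not None:
--         below_groups = dedup([g for g in groups if len(g) <= below])
--         if below_groups:
--             return below_groups
--
--     min_len = min(len(g) for g in groups)
--     return dedup([g for g in groups if len(g) == min_len])
-- ===== Notes on version B (the rewrite author's own statement) =====
-- stated objective: simpler
-- what changed: Replaces the single interleaved pass with a running minimum and two in-loop accumulators by separate phases: filter-and-dedup the below-threshold groups, and otherwise compute the minimum length first and then filter-and-dedup the groups of that length.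
import Mathlib
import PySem

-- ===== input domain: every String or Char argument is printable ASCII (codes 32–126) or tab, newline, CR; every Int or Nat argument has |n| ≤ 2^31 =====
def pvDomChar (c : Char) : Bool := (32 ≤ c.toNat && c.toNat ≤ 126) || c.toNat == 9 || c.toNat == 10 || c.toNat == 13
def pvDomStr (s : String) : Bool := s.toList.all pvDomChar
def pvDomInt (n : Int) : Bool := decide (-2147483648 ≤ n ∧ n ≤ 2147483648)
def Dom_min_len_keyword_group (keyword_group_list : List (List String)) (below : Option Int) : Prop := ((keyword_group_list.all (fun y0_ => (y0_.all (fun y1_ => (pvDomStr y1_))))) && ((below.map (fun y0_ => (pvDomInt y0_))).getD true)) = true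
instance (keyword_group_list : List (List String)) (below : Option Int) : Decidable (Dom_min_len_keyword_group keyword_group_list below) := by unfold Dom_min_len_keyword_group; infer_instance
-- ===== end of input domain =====

-- B replaces A's single interleaved pass (running min + two in-loop accumulators) by
-- separate phases: dedup-filter the below-threshold groups, else compute the minimum
-- length first and then dedup-filter the groups of that length (objective: simpler).

-- ===== PORT A =====
-- loop body of A: first the below_group_list append, then the running-min update
def pvAStep (below : Option Int) (st : List (List String) × Nat × List (List String))
    (group : List String) : List (List String) × Nat × List (List String) :=
  let bgl : List (List String) :=
    match below with
    | some b => if ((group.length : Int) ≤ b) ∧ group ∉ st.2.2 then st.2.2 ++ [group] else st.2.2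
    | none => st.2.2
  if group.length < st.2.1 then ([group], group.length, bgl)
  else if group.length = st.2.1 ∧ group ∉ st.1 then (st.1 ++ [group], st.2.1, bgl)
  else (st.1, st.2.1, bgl)

def min_len_keyword_group (keyword_group_list : List (List String)) (below : Option Int) : List (List String) :=
  match keyword_group_list with
  | [] => []
  | x0 :: _ =>
    let st := keyword_group_list.foldl (pvAStep below) ([x0], x0.length, [])
    match below with
    | some _ => if st.2.2 ≠ [] then st.2.2 else st.1
    | none => st.1

-- ===== PORT B =====
-- B's dedup helper: 'out = []; for g in xs: if g not in out: out.append(g)'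
def pvDDStep (out : List (List String)) (g : List String) : List (List String) :=
  if g ∈ out then out else out ++ [g]

def pvDedup (xs : List (List String)) : List (List String) := xs.foldl pvDDStep []

def min_len_keyword_group_alt (keyword_group_list : List (List String)) (below : Option Int) : List (List String) :=
  match keyword_group_list with
  | [] => []
  | x0 :: rest =>
    let tryBelow : Option (List (List String)) :=
      match below with
      | some b =>
        let bg := pvDedup (keyword_group_list.filter (fun g => decide ((g.length : Int) ≤ b)))
        if bg ≠ [] then some bg else none
      | none => none
    match tryBelow with
    | some bg => bg
    | none =>
      -- min(len(g) for g in groups) over the nonempty list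
      let m := rest.foldl (fun acc g => Nat.min acc g.length) x0.length
      pvDedup (keyword_group_list.filter (fun g => decide (g.length = m)))

-- ===== PRECONDITION & SPEC =====
def Spec_min_len_keyword_group (keyword_group_list : List (List String)) (below : Option Int) (out : List (List String)) : Prop := out = min_len_keyword_group_alt keyword_group_list below
instance (keyword_group_list : List (List String)) (below : Option Int) (out : List (List String)) : Decidable (Spec_min_len_keyword_group keyword_group_list below out) := by unfold Spec_min_len_keyword_group; infer_instance

-- ===== CLAIM (what is proved, stated in full; the proofs are below) =====
def Claim_equal_min_len_keyword_group : Prop := ∀ (keyword_group_list : List (List String)) (below : Option Int), Dom_min_len_keyword_group keyword_group_list below → Spec_min_len_keyword_group keyword_group_list below (min_len_keyword_group keyword_group_list below)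

-- ===== LEMMAS AND PROOFS =====

-- A's running-min part of the loop body, in isolation
def pvMStep (st : List (List String) × Nat) (g : List String) : List (List String) × Nat :=
  if g.length < st.2 then ([g], g.length)
  else if g.length = st.2 ∧ g ∉ st.1 then (st.1 ++ [g], st.2)
  else st

-- A's below_group_list part of the loop body, in isolation
def pvBStep (below : Option Int) (acc : List (List String)) (g : List String) : List (List String) :=
  match below with
  | some b => if ((g.length : Int) ≤ b) ∧ g ∉ acc then acc ++ [g] else acc
  | none => acc

def pvMinLen (ml : Nat) (xs : List (List String)) : Nat :=
  xs.foldl (fun acc g => Nat.min acc g.length) ml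

lemma foldl_split (below : Option Int) :
    ∀ (xs : List (List String)) (mgl : List (List String)) (ml : Nat) (bgl : List (List String)),
      xs.foldl (pvAStep below) (mgl, ml, bgl)
        = ((xs.foldl pvMStep (mgl, ml)).1, (xs.foldl pvMStep (mgl, ml)).2,
            xs.foldl (pvBStep below) bgl) := by
  intro xs
  induction xs with
  | nil => intro mgl ml bgl; rfl
  | cons g t ih =>
    intro mgl ml bgl
    have hstep : pvAStep below (mgl, ml, bgl) g
        = ((pvMStep (mgl, ml) g).1, (pvMStep (mgl, ml) g).2, pvBStep below bgl g) := by
      simp only [pvAStep, pvMStep, pvBStep]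
      split_ifs <;> rfl
    simp only [List.foldl_cons, hstep, ih]

lemma pvDedup_append_one (ys : List (List String)) (g : List String) :
    pvDedup (ys ++ [g]) = pvDDStep (pvDedup ys) g := by
  simp [pvDedup, List.foldl_append]

lemma pvDedup_cons_cons (a : List String) (t : List (List String)) :
    pvDedup (a :: a :: t) = pvDedup (a :: t) := by
  simp [pvDedup, List.foldl_cons, pvDDStep]

lemma bgl_lemma (b : Int) :
    ∀ (xs : List (List String)) (acc : List (List String)),
      xs.foldl (pvBStep (some b)) acc
        = (xs.filter (fun g => decide ((g.length : Int) ≤ b))).foldl pvDDStep acc := by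
  intro xs
  induction xs with
  | nil => intro acc; rfl
  | cons g t ih =>
    intro acc
    by_cases hle : (g.length : Int) ≤ b
    · by_cases hm : g ∈ acc
      · simp [pvBStep, pvDDStep, hle, hm, ih]
      · simp [pvBStep, pvDDStep, hle, hm, ih]
    · simp [pvBStep, hle, ih]

lemma mgl_lemma :
    ∀ (xs pref : List (List String)) (ml : Nat),
      (∀ g ∈ pref, ml ≤ g.length) →
      xs.foldl pvMStep (pvDedup (pref.filter (fun g => decide (g.length = ml))), ml)
        = (pvDedup ((pref ++ xs).filter (fun g => decide (g.length = pvMinLen ml xs))),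
            pvMinLen ml xs) := by
  intro xs
  induction xs with
  | nil =>
    intro pref ml _
    simp only [List.foldl_nil, pvMinLen, List.append_nil]
    rfl
  | cons g t ih =>
    intro pref ml hpref
    rcases Nat.lt_trichotomy g.length ml with hlt | heq | hgt
    · -- smaller: restart with [g]
      have h1 : pvMStep (pvDedup (pref.filter (fun g => decide (g.length = ml))), ml) g
          = ([g], g.length) := by simp [pvMStep, hlt]
      have h2 : (pref ++ [g]).filter (fun x => decide (x.length = g.length)) = [g] := by
        rw [List.filter_append]
        have : pref.filter (fun x => decide (x.length = g.length)) = [] := by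
          rw [List.filter_eq_nil_iff]
          intro x hx
          have := hpref x hx
          simp; omega
        simp [this]
      have h3 : [g] = pvDedup ((pref ++ [g]).filter (fun x => decide (x.length = g.length))) := by
        rw [h2]; rfl
      have hp' : ∀ h ∈ pref ++ [g], g.length ≤ h.length := by
        intro h hh
        rcases List.mem_append.mp hh with hh | hh
        · exact le_of_lt (lt_of_lt_of_le hlt (hpref h hh))
        · simp at hh; subst hh; exact le_refl _
      have hmin : pvMinLen ml (g :: t) = pvMinLen g.length t := by
        simp [pvMinLen, List.foldl_cons, Nat.min_eq_right (le_of_lt hlt)]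
      rw [List.foldl_cons, h1, h3, ih (pref ++ [g]) g.length hp', hmin,
        List.append_assoc]
      rfl
    · -- equal: behaves as dedup-append of g
      have h1 : pvMStep (pvDedup (pref.filter (fun g => decide (g.length = ml))), ml) g
          = (pvDedup ((pref ++ [g]).filter (fun x => decide (x.length = ml))), ml) := by
        rw [List.filter_append]
        have : [g].filter (fun x => decide (x.length = ml)) = [g] := by simp [heq]
        rw [this, pvDedup_append_one]
        simp only [pvMStep, pvDDStep]
        have hnl : ¬ g.length < ml := by omega
        by_cases hm : g ∈ pvDedup (pref.filter (fun g => decide (g.length = ml)))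
        · simp [heq, hm]
        · simp [heq, hm]
      have hp' : ∀ h ∈ pref ++ [g], ml ≤ h.length := by
        intro h hh
        rcases List.mem_append.mp hh with hh | hh
        · exact hpref h hh
        · simp at hh; subst hh; omega
      have hmin : pvMinLen ml (g :: t) = pvMinLen ml t := by
        simp [pvMinLen, List.foldl_cons, Nat.min_eq_left (le_of_eq heq.symm)]
      rw [List.foldl_cons, h1, ih (pref ++ [g]) ml hp', hmin, List.append_assoc]
      rfl
    · -- larger: nothing changes
      have h1 : pvMStep (pvDedup (pref.filter (fun g => decide (g.length = ml))), ml) g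
          = (pvDedup ((pref ++ [g]).filter (fun x => decide (x.length = ml))), ml) := by
        rw [List.filter_append]
        have : [g].filter (fun x => decide (x.length = ml)) = [] := by simp; omega
        rw [this, List.append_nil]
        simp only [pvMStep]
        have hnl : ¬ g.length < ml := by omega
        have hne : ¬ g.length = ml := by omega
        simp [hnl, hne]
      have hp' : ∀ h ∈ pref ++ [g], ml ≤ h.length := by
        intro h hh
        rcases List.mem_append.mp hh with hh | hh
        · exact hpref h hh
        · simp at hh; subst hh; omega
      have hmin : pvMinLen ml (g :: t) = pvMinLen ml t := by
        simp [pvMinLen, List.foldl_cons, Nat.min_eq_left (le_of_lt hgt)]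
      rw [List.foldl_cons, h1, ih (pref ++ [g]) ml hp', hmin, List.append_assoc]
      rfl

lemma min_part_eq (x0 : List String) (rest : List (List String)) :
    (x0 :: rest).foldl pvMStep ([x0], x0.length)
      = (pvDedup ((x0 :: rest).filter (fun g => decide (g.length = pvMinLen x0.length rest))),
          pvMinLen x0.length rest) := by
  have hinit : ([x0] : List (List String)) = pvDedup (([x0]).filter (fun g => decide (g.length = x0.length))) := by
    simp [pvDedup, List.foldl, pvDDStep]
  have hmin : pvMinLen x0.length (x0 :: rest) = pvMinLen x0.length rest := by
    simp [pvMinLen, List.foldl_cons]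
  have h := mgl_lemma (x0 :: rest) [x0] x0.length (by intro g hg; simp at hg; subst hg; exact le_refl _)
  rw [hinit, h, hmin]
  congr 1
  -- pvDedup ((x0 :: x0 :: rest).filter p) = pvDedup ((x0 :: rest).filter p)
  have hflt : ([x0] ++ x0 :: rest) = x0 :: x0 :: rest := rfl
  rw [hflt]
  by_cases hp : x0.length = pvMinLen x0.length rest
  · have hpx := decide_eq_true hp
    simp only [List.filter_cons, hpx, if_true]
    exact pvDedup_cons_cons _ _
  · have hpx := decide_eq_false hp
    simp only [List.filter_cons, hpx, Bool.false_eq_true, if_false]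

-- ===== VERDICT (by name: the statement is the Claim_ definition above) =====
theorem min_len_keyword_group_spec : Claim_equal_min_len_keyword_group := by
  intro l below _
  unfold Spec_min_len_keyword_group
  cases l with
  | nil => cases below <;> rfl
  | cons x0 rest =>
    have hsplit := foldl_split below (x0 :: rest) [x0] x0.length []
    have hm := min_part_eq x0 rest
    cases below with
    | none =>
      simp only [min_len_keyword_group, min_len_keyword_group_alt, hsplit, hm]
      rfl
    | some b =>
      have hb := bgl_lemma b (x0 :: rest) []
      simp only [min_len_keyword_group, min_len_keyword_group_alt, hsplit, hm, hb, pvDedup, pvMinLen]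
      by_cases hne : ((x0 :: rest).filter (fun g => decide ((g.length : Int) ≤ b))).foldl pvDDStep [] = []
      · simp only [if_neg (not_not_intro hne)]
        rfl
      · simp only [if_pos hne]
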